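-- pv_equiv track=rewrite | github.com/bluefishforsale/algorithms | reverse_recursive.py | rreverse
-- ===== SOURCE A (Python) =====
-- def rreverse(data):
--     if len(data) == 0:
--         return
--     if len(data) == 1:
--         return data
--     this = list()
--     for i in range(len(data)):
--         return data[-1] + rreverse(data[i:-1])
-- ===== SOURCE B (Python) =====
-- def rreverse(data):
--     if len(data) == 0:
--         return None
--     return ''.join(reversed(data))
-- ===== Notes on version B (the rewrite author's own statement) =====
-- stated objective: faster
-- what changed: Replaces A's recursion with repeated string concatenation (one slice copy and one '+' per level) by a single reversed-iterator join, removing the recursion and the quadratic copying.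
import Mathlib
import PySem

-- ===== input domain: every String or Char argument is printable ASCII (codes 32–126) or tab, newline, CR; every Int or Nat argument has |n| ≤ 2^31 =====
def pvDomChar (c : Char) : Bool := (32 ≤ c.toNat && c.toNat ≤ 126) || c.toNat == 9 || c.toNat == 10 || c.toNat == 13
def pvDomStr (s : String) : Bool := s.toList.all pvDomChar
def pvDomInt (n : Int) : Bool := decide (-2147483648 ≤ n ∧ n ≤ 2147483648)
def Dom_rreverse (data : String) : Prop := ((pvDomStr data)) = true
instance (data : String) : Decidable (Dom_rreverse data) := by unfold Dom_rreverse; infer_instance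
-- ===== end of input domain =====

-- B replaces A's recursion (slice + '+' per level) by a single reversed join; measurably faster (asymptotic).

-- ===== PORT A =====
-- recursion on the character list; data[-1] → pyGet? (-1), data[0:-1] → slice 0 (-1);
-- the 'for i in range(len(data))' loop returns on its first iteration (i = 0), so only i = 0 is executed
def rreverseGo (l : List Char) : Option (List Char) :=
  if _h0 : l.length = 0 then none
  else if l.length = 1 then some l
  else
    match PySem.List.pyGet? l (-1), rreverseGo (PySem.List.slice l (some 0) (some (-1))) with
    | some c, some s => some (c :: s)
    | _, _ => none
termination_by l.length
decreasing_by
  simp [PySem.List.slice_zero_start, PySem.List.slice_to_neg_one]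
  omega

def rreverse (data : String) : Option String :=
  (rreverseGo data.toList).map String.mk

-- ===== PORT B =====
def rreverse_alt (data : String) : Option String :=
  if data.toList.length = 0 then none
  else some (String.mk data.toList.reverse)

-- ===== PRECONDITION & SPEC =====
def Spec_rreverse (data : String) (out : Option String) : Prop := out = rreverse_alt data
instance (data : String) (out : Option String) : Decidable (Spec_rreverse data out) := by unfold Spec_rreverse; infer_instance

-- ===== CLAIM (what is proved, stated in full; the proofs are below) =====
def Claim_equal_rreverse : Prop := ∀ (data : String), Dom_rreverse data → Spec_rreverse data (rreverse data)

-- ===== LEMMAS AND PROOFS =====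
theorem rreverseGo_eq (l : List Char) (h : l ≠ []) : rreverseGo l = some l.reverse := by
  induction hn : l.length using Nat.strong_induction_on generalizing l with
  | _ n ih =>
  have h0 : ¬ l.length = 0 := by simp [hn]; intro he; exact h (List.length_eq_zero_iff.mp (hn ▸ he)) 
  rw [rreverseGo]
  rw [dif_neg (by omega : ¬ l.length = 0)]
  by_cases h1 : l.length = 1
  · rw [if_pos h1]
    match l, h1 with
    | [c], _ => simp
  · rw [if_neg h1]
    have h2 : 2 ≤ l.length := by omega
    have hd : PySem.List.slice l (some 0) (some (-1)) = l.dropLast := by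
      simp [PySem.List.slice_zero_start, PySem.List.slice_to_neg_one]
    have hne : l.dropLast ≠ [] := by
      intro he
      have := congrArg List.length he
      simp [List.length_dropLast] at this; omega
    have hrec : rreverseGo l.dropLast = some l.dropLast.reverse := by
      exact ih l.dropLast.length (by simp [List.length_dropLast]; omega) l.dropLast hne rfl
    rw [hd, hrec, PySem.List.pyGet?_neg_one l, List.getLast?_eq_some_getLast h]
    have : l.reverse = l.getLast h :: l.dropLast.reverse := by
      conv_lhs => rw [← List.dropLast_append_getLast h]
      simp
    rw [this]

-- ===== VERDICT (by name: the statement is the Claim_ definition above) =====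
theorem rreverse_spec : Claim_equal_rreverse := by
  intro data _
  unfold Spec_rreverse rreverse rreverse_alt
  by_cases h : data.toList = []
  · simp [h, rreverseGo]
  · rw [rreverseGo_eq data.toList h]
    have hne : ¬ data = "" := fun he => h (by simp [he])
    simp [hne]
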